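-- pv_equiv track=rewrite | github.com/gigama/training-day | training-day.py | calculate_cooccurrence
-- ===== SOURCE A (Python) =====
-- from collections import defaultdict
--
-- def calculate_cooccurrence(tokens, window_size=5):
--     matrix = defaultdict(lambda: defaultdict(int))
--     for i, token in enumerate(tokens):
--         start = max(0, i - window_size)
--         end = min(len(tokens), i + window_size + 1)
--         for j in range(start, end):
--             if i != j:
--                 matrix[token][tokens[j]] += 1
--     return matrix
-- ===== SOURCE B (Python) =====
-- from collections import defaultdict, Counter
--
-- def calculate_cooccurrence(tokens, window_size=5):
--     n = len(tokens)
--     positions = {}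
--     for i, t in enumerate(tokens):
--         positions.setdefault(t, []).append(i)
--     matrix = defaultdict(lambda: defaultdict(int))
--     for t, ps in positions.items():
--         counts = Counter()
--         for i in ps:
--             counts.update(tokens[max(0, i - window_size):i])
--             counts.update(tokens[i + 1:max(0, min(n, i + window_size + 1))])
--         for u, c in counts.items():
--             matrix[t][u] += c
--     return matrix
-- ===== Notes on version B (the rewrite author's own statement) =====
-- stated objective: alternative
-- what changed: B first groups token positions into a dict with setdefault, then for each distinct token builds one Counter from the slice-concatenated windows of all its occurrences and writes it into the matrix, instead of A's per-center index loop doing a unit increment per in-window index.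
import Mathlib
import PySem

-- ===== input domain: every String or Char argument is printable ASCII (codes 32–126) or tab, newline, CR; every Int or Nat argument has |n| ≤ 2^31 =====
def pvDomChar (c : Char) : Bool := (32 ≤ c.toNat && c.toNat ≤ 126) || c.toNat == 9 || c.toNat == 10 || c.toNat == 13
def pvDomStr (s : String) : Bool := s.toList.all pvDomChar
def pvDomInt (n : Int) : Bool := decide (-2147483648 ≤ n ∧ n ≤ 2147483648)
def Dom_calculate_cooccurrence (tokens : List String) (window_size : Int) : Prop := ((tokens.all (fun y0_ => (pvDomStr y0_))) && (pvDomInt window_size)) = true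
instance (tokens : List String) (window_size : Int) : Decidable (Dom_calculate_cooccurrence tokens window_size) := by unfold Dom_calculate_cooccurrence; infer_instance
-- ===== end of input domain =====

-- B groups the token positions once and counts each token's concatenated windows with a
-- Counter built from slices, instead of A's per-center index loop; objective: alternative
-- decomposition (same asymptotic cost), return value identical including insertion order.

-- ===== PORT A =====
-- 'd[u] += c' on a defaultdict(int): modify in place if present, else append — exact.
def pvBump (d : List (String × Int)) (u : String) (c : Int) : List (String × Int) :=
  match d with
  | [] => [(u, c)]
  | (k, v) :: rest => if k = u then (k, v + c) :: rest else (k, v) :: pvBump rest u c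

-- 'matrix[t][u] += c' on defaultdict(lambda: defaultdict(int)) — exact.
def pvBumpOuter (m : List (String × List (String × Int))) (t u : String) (c : Int) :
    List (String × List (String × Int)) :=
  match m with
  | [] => [(t, pvBump [] u c)]
  | (k, d) :: rest => if k = t then (k, pvBump d u c) :: rest else (k, d) :: pvBumpOuter rest t u c

def calculate_cooccurrence (tokens : List String) (window_size : Int) :
    List (String × List (String × Int)) :=
  (PySem.List.enumerate tokens).foldl
    (fun m p =>
      let start : Int := max 0 (p.1 - window_size)
      let stop : Int := min (tokens.length : Int) (p.1 + window_size + 1)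
      -- tokens[j]: j always in range here (0 ≤ start, stop ≤ len), so pyGetD is exact
      (PySem.List.pyRange start stop 1).foldl
        (fun m j => if p.1 ≠ j then pvBumpOuter m p.2 (PySem.List.pyGetD tokens j "") 1 else m)
        m)
    []

-- ===== PORT B =====
-- 'positions.setdefault(t, []).append(i)' — exact.
def pvSetdefaultAppend (g : List (String × List Int)) (t : String) (i : Int) :
    List (String × List Int) :=
  match g with
  | [] => [(t, [i])]
  | (k, l) :: rest => if k = t then (k, l ++ [i]) :: rest else (k, l) :: pvSetdefaultAppend rest t i

-- 'counts.update(ws)' on a Counter — exact (new keys appended, old counts bumped in place).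
def pvCounterUpd (c : List (String × Int)) (ws : List String) : List (String × Int) :=
  ws.foldl (fun c u => pvBump c u 1) c

def calculate_cooccurrence_alt (tokens : List String) (window_size : Int) :
    List (String × List (String × Int)) :=
  let n : Int := (tokens.length : Int)
  let positions := (PySem.List.enumerate tokens).foldl (fun g p => pvSetdefaultAppend g p.2 p.1) []
  positions.foldl
    (fun m q =>
      let counts := q.2.foldl
        (fun c i =>
          pvCounterUpd
            (pvCounterUpd c (PySem.List.slice tokens (some (max 0 (i - window_size))) (some i)))
            (PySem.List.slice tokens (some (i + 1)) (some (max 0 (min n (i + window_size + 1))))))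
        []
      counts.foldl (fun m r => pvBumpOuter m q.1 r.1 r.2) m)
    []

-- ===== PRECONDITION & SPEC =====
def Spec_calculate_cooccurrence (tokens : List String) (window_size : Int) (out : List (String × List (String × Int))) : Prop := out = calculate_cooccurrence_alt tokens window_size
instance (tokens : List String) (window_size : Int) (out : List (String × List (String × Int))) : Decidable (Spec_calculate_cooccurrence tokens window_size out) := by unfold Spec_calculate_cooccurrence; infer_instance

-- ===== CLAIM (what is proved, stated in full; the proofs are below) =====
def Claim_equal_calculate_cooccurrence : Prop := ∀ (tokens : List String) (window_size : Int), Dom_calculate_cooccurrence tokens window_size → Spec_calculate_cooccurrence tokens window_size (calculate_cooccurrence tokens window_size)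

-- ===== LEMMAS AND PROOFS =====

-- keys of an association list
def pvKeys {β : Type} (m : List (String × β)) : List String := m.map (·.1)

-- the window word list of center i (B's slices; equals A's filtered index range)
def pvWin (tokens : List String) (w i : Int) : List String :=
  PySem.List.slice tokens (some (max 0 (i - w))) (some i) ++
  PySem.List.slice tokens (some (i + 1)) (some (max 0 (min (tokens.length : Int) (i + w + 1))))

-- a Counter built from scratch
def pvCtr (ws : List String) : List (String × Int) := pvCounterUpd [] ws

-- all unit increments of one center: ws.foldl (bumpOuter · t · 1)
def pvUFold (m : List (String × List (String × Int))) (t : String) (ws : List String) :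
    List (String × List (String × Int)) :=
  ws.foldl (fun m u => pvBumpOuter m t u 1) m

-- grouping of (index, token) pairs by token, first-occurrence order
def pvGrp : List (Int × String) → List (String × List Int)
  | [] => []
  | (i, t) :: L =>
      (t, i :: (L.filterMap fun p => if p.2 = t then some p.1 else none)) ::
        pvGrp (L.filter fun p => p.2 ≠ t)
  termination_by L => L.length
  decreasing_by simp; exact le_trans (List.length_filter_le _ _) (by simp)

-- cumulative weighted increments of one group's counter items
def pvCFold (m : List (String × List (String × Int))) (t : String)
    (items : List (String × Int)) : List (String × List (String × Int)) :=
  items.foldl (fun m r => pvBumpOuter m t r.1 r.2) m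

-- ---- pvKeys basics ----
theorem pvKeys_cons {β : Type} (p : String × β) (m : List (String × β)) :
    pvKeys (p :: m) = p.1 :: pvKeys m := rfl
theorem pvKeys_append {β : Type} (m m' : List (String × β)) :
    pvKeys (m ++ m') = pvKeys m ++ pvKeys m' := by simp [pvKeys]

-- ---- pvBump basics ----
theorem pvBump_fresh (d : List (String × Int)) (u : String) (c : Int) (h : u ∉ pvKeys d) :
    pvBump d u c = d ++ [(u, c)] := by
  induction d with
  | nil => rfl
  | cons p rest ih =>
      rw [pvKeys_cons] at h
      simp only [List.mem_cons, not_or] at h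
      simp [pvBump, Ne.symm h.1, ih h.2]

theorem pvBump_ne_nil (d : List (String × Int)) (u : String) (c : Int) :
    pvBump d u c ≠ [] := by
  cases d with
  | nil => simp [pvBump]
  | cons p rest => simp only [pvBump]; split <;> simp

theorem keys_pvBump (d : List (String × Int)) (u : String) (c : Int) :
    pvKeys (pvBump d u c) = if u ∈ pvKeys d then pvKeys d else pvKeys d ++ [u] := by
  induction d with
  | nil => simp [pvBump, pvKeys]
  | cons p rest ih =>
      by_cases hk : p.1 = u
      · simp [pvBump, hk, pvKeys_cons]
      · rw [pvBump, if_neg hk, pvKeys_cons, pvKeys_cons, ih]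
        by_cases hu : u ∈ pvKeys rest
        · simp [hu, Ne.symm hk]
        · simp [hu, Ne.symm hk]

theorem nodup_keys_pvBump (d : List (String × Int)) (u : String) (c : Int)
    (h : (pvKeys d).Nodup) : (pvKeys (pvBump d u c)).Nodup := by
  rw [keys_pvBump]
  split
  · exact h
  · next hu => simp [List.nodup_append, h]; intro a ha e; exact hu (e ▸ ha)

theorem nodup_keys_ctrFold (ws : List String) (d : List (String × Int))
    (h : (pvKeys d).Nodup) : (pvKeys (ws.foldl (fun c u => pvBump c u 1) d)).Nodup := by
  induction ws generalizing d with
  | nil => simpa using h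
  | cons u ws ih => exact ih _ (nodup_keys_pvBump _ _ _ h)

theorem ctrFold_ne_nil (ws : List String) (d : List (String × Int)) (h : d ≠ []) :
    ws.foldl (fun c u => pvBump c u 1) d ≠ [] := by
  induction ws generalizing d with
  | nil => simpa using h
  | cons u ws ih => exact ih _ (pvBump_ne_nil _ _ _)

theorem nodup_keys_pvCtr (ws : List String) : (pvKeys (pvCtr ws)).Nodup :=
  nodup_keys_ctrFold ws [] (by simp [pvKeys])

theorem pvCtr_cons (u : String) (ws : List String) :
    pvCtr (u :: ws) = ws.foldl (fun c v => pvBump c v 1) [(u, 1)] := rfl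

theorem pvCtr_ne_nil (u : String) (ws : List String) : pvCtr (u :: ws) ≠ [] := by
  rw [pvCtr_cons]; exact ctrFold_ne_nil _ _ (by simp)

-- ---- pvBumpOuter basics ----
theorem pvBumpOuter_fresh (m : List (String × List (String × Int))) (t u : String) (c : Int)
    (h : t ∉ pvKeys m) : pvBumpOuter m t u c = m ++ [(t, [(u, c)])] := by
  induction m with
  | nil => rfl
  | cons p rest ih =>
      rw [pvKeys_cons] at h
      simp only [List.mem_cons, not_or] at h
      simp [pvBumpOuter, Ne.symm h.1, ih h.2]

theorem pvBumpOuter_append_found (m : List (String × List (String × Int)))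
    (t u : String) (c : Int) (d : List (String × Int)) (h : t ∉ pvKeys m) :
    pvBumpOuter (m ++ [(t, d)]) t u c = m ++ [(t, pvBump d u c)] := by
  induction m with
  | nil => simp [pvBumpOuter]
  | cons p rest ih =>
      rw [pvKeys_cons] at h
      simp only [List.mem_cons, not_or] at h
      rw [List.cons_append, pvBumpOuter, if_neg (Ne.symm h.1), ih h.2, List.cons_append]

theorem keys_pvBumpOuter (m : List (String × List (String × Int))) (t u : String) (c : Int) :
    pvKeys (pvBumpOuter m t u c) = if t ∈ pvKeys m then pvKeys m else pvKeys m ++ [t] := by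
  induction m with
  | nil => simp [pvBumpOuter, pvKeys]
  | cons p rest ih =>
      by_cases hk : p.1 = t
      · simp [pvBumpOuter, hk, pvKeys_cons]
      · rw [pvBumpOuter, if_neg hk, pvKeys_cons, pvKeys_cons, ih]
        by_cases hu : t ∈ pvKeys rest
        · simp [hu, Ne.symm hk]
        · simp [hu, Ne.symm hk]

theorem mem_keys_pvBumpOuter_mono (m : List (String × List (String × Int)))
    (t u a : String) (c : Int) (h : a ∈ pvKeys m) : a ∈ pvKeys (pvBumpOuter m t u c) := by
  rw [keys_pvBumpOuter]; split <;> simp [h]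

theorem mem_keys_pvBumpOuter_self (m : List (String × List (String × Int)))
    (t u : String) (c : Int) : t ∈ pvKeys (pvBumpOuter m t u c) := by
  rw [keys_pvBumpOuter]; split
  · assumption
  · simp

theorem pvBumpOuter_comm (m : List (String × List (String × Int))) (s t u u' : String)
    (c c' : Int) (hne : s ≠ t) (ht : t ∈ pvKeys m) :
    pvBumpOuter (pvBumpOuter m s u c) t u' c' = pvBumpOuter (pvBumpOuter m t u' c') s u c := by
  induction m with
  | nil => simp [pvKeys] at ht
  | cons p rest ih =>
      rw [pvKeys_cons] at ht
      by_cases hps : p.1 = s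
      · have hpt : p.1 ≠ t := by rw [hps]; exact hne
        rw [pvBumpOuter, if_pos hps, pvBumpOuter, if_neg hpt,
            pvBumpOuter, if_neg hpt, pvBumpOuter, if_pos hps]
      · by_cases hpt : p.1 = t
        · rw [pvBumpOuter, if_neg hps, pvBumpOuter, if_pos hpt,
              pvBumpOuter, if_pos hpt, pvBumpOuter, if_neg hps]
        · have ht' : t ∈ pvKeys rest := by
            rcases List.mem_cons.mp ht with h | h
            · exact absurd h.symm hpt
            · exact h
          rw [pvBumpOuter, if_neg hps, pvBumpOuter, if_neg hpt,
              pvBumpOuter, if_neg hpt, pvBumpOuter, if_neg hps, ih ht']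

-- ---- pvUFold lemmas ----
theorem pvUFold_nil (m : List (String × List (String × Int))) (t : String) :
    pvUFold m t [] = m := rfl

theorem pvUFold_append (m : List (String × List (String × Int))) (t : String)
    (ws ws' : List String) : pvUFold m t (ws ++ ws') = pvUFold (pvUFold m t ws) t ws' :=
  List.foldl_append

theorem mem_keys_pvUFold_mono (ws : List String) (m : List (String × List (String × Int)))
    (t a : String) (h : a ∈ pvKeys m) : a ∈ pvKeys (pvUFold m t ws) := by
  induction ws generalizing m with
  | nil => exact h
  | cons u ws ih => exact ih _ (mem_keys_pvBumpOuter_mono _ _ _ _ _ h)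

theorem mem_keys_pvUFold_self (ws : List String) (m : List (String × List (String × Int)))
    (t : String) (h : ws ≠ []) : t ∈ pvKeys (pvUFold m t ws) := by
  cases ws with
  | nil => exact absurd rfl h
  | cons u ws =>
      exact mem_keys_pvUFold_mono ws _ _ _ (mem_keys_pvBumpOuter_self m t u 1)

theorem pvBumpOuter_pvUFold_comm (ws : List String)
    (m : List (String × List (String × Int))) (s t u' : String) (c' : Int)
    (hne : s ≠ t) (ht : t ∈ pvKeys m) :
    pvBumpOuter (pvUFold m s ws) t u' c' = pvUFold (pvBumpOuter m t u' c') s ws := by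
  induction ws generalizing m with
  | nil => rfl
  | cons u ws ih =>
      show pvBumpOuter (pvUFold (pvBumpOuter m s u 1) s ws) t u' c' = _
      rw [ih _ (mem_keys_pvBumpOuter_mono _ _ _ _ _ ht),
          pvBumpOuter_comm _ _ _ _ _ _ _ hne ht]
      rfl

theorem pvUFold_comm (ws' ws : List String) (m : List (String × List (String × Int)))
    (s t : String) (hne : s ≠ t) (ht : t ∈ pvKeys m) :
    pvUFold (pvUFold m s ws) t ws' = pvUFold (pvUFold m t ws') s ws := by
  induction ws' generalizing m with
  | nil => rfl
  | cons u ws' ih =>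
      show pvUFold (pvBumpOuter (pvUFold m s ws) t u 1) t ws' = _
      rw [pvBumpOuter_pvUFold_comm _ _ _ _ _ _ hne ht,
          ih _ (mem_keys_pvBumpOuter_self _ _ _ _)]
      rfl

theorem pvUFold_found (ws : List String) (m : List (String × List (String × Int)))
    (t : String) (d : List (String × Int)) (h : t ∉ pvKeys m) :
    pvUFold (m ++ [(t, d)]) t ws = m ++ [(t, ws.foldl (fun d u => pvBump d u 1) d)] := by
  induction ws generalizing d with
  | nil => rfl
  | cons u ws ih =>
      show pvUFold (pvBumpOuter (m ++ [(t, d)]) t u 1) t ws = _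
      rw [pvBumpOuter_append_found _ _ _ _ _ h, ih]
      rfl

theorem pvUFold_fresh (ws : List String) (m : List (String × List (String × Int)))
    (t : String) (h : t ∉ pvKeys m) :
    pvUFold m t ws = if ws = [] then m else m ++ [(t, pvCtr ws)] := by
  cases ws with
  | nil => rfl
  | cons u ws =>
      show pvUFold (pvBumpOuter m t u 1) t ws = _
      rw [pvBumpOuter_fresh _ _ _ _ h, pvUFold_found _ _ _ _ h]
      simp [pvCtr_cons]

-- ---- pvCFold lemmas ----
theorem pvCFold_found (items : List (String × Int)) (m : List (String × List (String × Int)))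
    (t : String) (d : List (String × Int)) (h : t ∉ pvKeys m) :
    pvCFold (m ++ [(t, d)]) t items = m ++ [(t, items.foldl (fun d r => pvBump d r.1 r.2) d)] := by
  induction items generalizing d with
  | nil => rfl
  | cons r items ih =>
      show pvCFold (pvBumpOuter (m ++ [(t, d)]) t r.1 r.2) t items = _
      rw [pvBumpOuter_append_found _ _ _ _ _ h, ih]
      rfl

theorem pvRebuild (items d : List (String × Int))
    (hdisj : ∀ a ∈ pvKeys items, a ∉ pvKeys d) (hnd : (pvKeys items).Nodup) :
    items.foldl (fun d r => pvBump d r.1 r.2) d = d ++ items := by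
  induction items generalizing d with
  | nil => simp
  | cons r items ih =>
      rw [pvKeys_cons] at hdisj hnd
      simp only [List.nodup_cons] at hnd
      have h1 : r.1 ∉ pvKeys d := hdisj r.1 (by simp)
      rw [List.foldl_cons, pvBump_fresh _ _ _ h1, ih]
      · simp
      · intro a ha
        rw [pvKeys_append]
        simp only [List.mem_append, not_or]
        refine ⟨hdisj a (by simp [ha]), ?_⟩
        simp [pvKeys]
        intro e
        exact hnd.1 (e ▸ ha)
      · exact hnd.2

theorem pvCFold_fresh (items : List (String × Int)) (m : List (String × List (String × Int)))
    (t : String) (h : t ∉ pvKeys m) (hnd : (pvKeys items).Nodup) (hne : items ≠ []) :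
    pvCFold m t items = m ++ [(t, items)] := by
  cases items with
  | nil => exact absurd rfl hne
  | cons r items =>
      show pvCFold (pvBumpOuter m t r.1 r.2) t items = _
      rw [pvBumpOuter_fresh _ _ _ _ h, pvCFold_found _ _ _ _ h]
      rw [pvKeys_cons] at hnd
      simp only [List.nodup_cons] at hnd
      have : items.foldl (fun d r => pvBump d r.1 r.2) [(r.1, r.2)] = [(r.1, r.2)] ++ items := by
        apply pvRebuild
        · intro a ha
          simp [pvKeys]
          intro e
          exact hnd.1 (e ▸ ha)
        · exact hnd.2
      rw [this]
      simp

-- ---- window lemmas ----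
theorem map_getD_range_slice (tokens : List String) (a b : Int)
    (ha : 0 ≤ a) (hab : a ≤ b) (hb : b ≤ (tokens.length : Int)) :
    (PySem.List.pyRange a b 1).map (fun j => PySem.List.pyGetD tokens j "") =
      PySem.List.slice tokens (some a) (some b) := by
  have hb0 : 0 ≤ b := le_trans ha hab
  rw [PySem.List.slice_toNat tokens ha hb0]
  have h := PySem.List.map_pyGetD_pyRange' tokens "" ha
  rw [PySem.List.pyRange_one_append a b _ hab hb, List.map_append] at h
  have hlen : ((PySem.List.pyRange a b 1).map (fun j => PySem.List.pyGetD tokens j "")).length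
      = b.toNat - a.toNat := by
    rw [List.length_map, PySem.List.length_pyRange_one]; omega
  calc (PySem.List.pyRange a b 1).map (fun j => PySem.List.pyGetD tokens j "")
      = (((PySem.List.pyRange a b 1).map (fun j => PySem.List.pyGetD tokens j "")) ++
          ((PySem.List.pyRange b (tokens.length : Int) 1).map (fun j => PySem.List.pyGetD tokens j ""))).take
          (b.toNat - a.toNat) := by rw [← hlen, List.take_left]
    _ = (tokens.drop a.toNat).take (b.toNat - a.toNat) := by rw [h]

theorem pvWin_nil (tokens : List String) (w i : Int) (h0 : 0 ≤ i)
    (hdeg : w ≤ 0 ∨ (tokens.length : Int) ≤ 1) (hi : i < (tokens.length : Int)) :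
    pvWin tokens w i = [] := by
  unfold pvWin
  rw [PySem.List.slice_toNat tokens (by omega) h0,
      PySem.List.slice_toNat tokens (by omega) (by omega)]
  rcases hdeg with hw | hn
  · have e1 : i.toNat - (max 0 (i - w)).toNat = 0 := by omega
    have e2 : (max 0 (min (tokens.length : Int) (i + w + 1))).toNat - (i + 1).toNat = 0 := by omega
    rw [e1, e2]; simp
  · have e0 : i = 0 := by omega
    subst e0
    have e1 : (0 : Int).toNat - (max 0 (0 - w)).toNat = 0 := by omega
    have e2 : (max 0 (min (tokens.length : Int) (0 + w + 1))).toNat - ((0 : Int) + 1).toNat = 0 := by omega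
    rw [e1, e2]; simp

theorem pvWin_ne_nil (tokens : List String) (w i : Int) (h0 : 0 ≤ i)
    (hi : i < (tokens.length : Int)) (hw : 1 ≤ w) (hn : 2 ≤ (tokens.length : Int)) :
    pvWin tokens w i ≠ [] := by
  unfold pvWin
  rw [PySem.List.slice_toNat tokens (by omega) h0,
      PySem.List.slice_toNat tokens (by omega) (by omega)]
  intro hcontra
  rw [List.append_eq_nil_iff] at hcontra
  have l1 := congrArg List.length hcontra.1
  have l2 := congrArg List.length hcontra.2
  simp [List.length_take, List.length_drop] at l1 l2
  omega

theorem inner_eq_pvUFold (tokens : List String) (w i : Int) (t : String)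
    (m : List (String × List (String × Int))) (h0 : 0 ≤ i) (hi : i < (tokens.length : Int)) :
    (PySem.List.pyRange (max 0 (i - w)) (min (tokens.length : Int) (i + w + 1)) 1).foldl
        (fun m j => if i ≠ j then pvBumpOuter m t (PySem.List.pyGetD tokens j "") 1 else m) m
      = pvUFold m t (pvWin tokens w i) := by
  rw [PySem.List.foldl_ite_eq_foldl_filter]
  by_cases hw : 1 ≤ w
  · have hsplit1 : PySem.List.pyRange (max 0 (i - w)) (min (tokens.length : Int) (i + w + 1)) 1
        = PySem.List.pyRange (max 0 (i - w)) i 1 ++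
          PySem.List.pyRange i (min (tokens.length : Int) (i + w + 1)) 1 :=
      PySem.List.pyRange_one_append _ _ _ (by omega) (by omega)
    have hsplit2 : PySem.List.pyRange i (min (tokens.length : Int) (i + w + 1)) 1
        = i :: PySem.List.pyRange (i + 1) (min (tokens.length : Int) (i + w + 1)) 1 :=
      PySem.List.pyRange_one_cons (by omega)
    rw [hsplit1, hsplit2, List.filter_append, List.filter_cons]
    have hfl : (PySem.List.pyRange (max 0 (i - w)) i 1).filter (fun j => decide (i ≠ j))
        = PySem.List.pyRange (max 0 (i - w)) i 1 := by
      apply List.filter_eq_self.mpr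
      intro j hj
      rw [PySem.List.mem_pyRange_one] at hj
      simp; omega
    have hfr : (PySem.List.pyRange (i + 1) (min (tokens.length : Int) (i + w + 1)) 1).filter
          (fun j => decide (i ≠ j))
        = PySem.List.pyRange (i + 1) (min (tokens.length : Int) (i + w + 1)) 1 := by
      apply List.filter_eq_self.mpr
      intro j hj
      rw [PySem.List.mem_pyRange_one] at hj
      simp; omega
    rw [hfl, hfr]
    simp only [decide_not, ne_eq]
    rw [if_neg (by simp)]
    have hmax : max 0 (min (tokens.length : Int) (i + w + 1)) = min (tokens.length : Int) (i + w + 1) := by omega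
    show _ = pvUFold m t _
    unfold pvWin
    rw [hmax, ← map_getD_range_slice tokens _ _ (by omega) (by omega) (by omega),
        ← map_getD_range_slice tokens _ _ (by omega) (by omega) (by omega),
        ← List.map_append]
    unfold pvUFold
    rw [List.foldl_map]
  · have hall : (PySem.List.pyRange (max 0 (i - w)) (min (tokens.length : Int) (i + w + 1)) 1).filter
        (fun j => decide (i ≠ j)) = [] := by
      apply List.filter_eq_nil_iff.mpr
      intro j hj
      rw [PySem.List.mem_pyRange_one] at hj
      simp; omega
    rw [hall, pvWin_nil tokens w i h0 (Or.inl (by omega)) hi]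
    rfl

-- A as a fold of per-center unit-increment folds over windows
theorem A_eq_big (tokens : List String) (w : Int) :
    calculate_cooccurrence tokens w
      = (PySem.List.enumerate tokens).foldl
          (fun m p => pvUFold m p.2 (pvWin tokens w p.1)) [] := by
  unfold calculate_cooccurrence
  apply PySem.List.foldl_congr_mem
  intro m p hp
  rw [PySem.List.mem_enumerate_iff] at hp
  obtain ⟨k, hk, rfl⟩ := hp
  exact inner_eq_pvUFold tokens w _ _ m (by omega) (by simp; omega)

-- ---- pulling one token's increments together ----
theorem pvPull (tokens : List String) (w : Int) (L : List (Int × String))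
    (m : List (String × List (String × Int))) (t : String) (ht : t ∈ pvKeys m) :
    L.foldl (fun m p => pvUFold m p.2 (pvWin tokens w p.1)) m
      = (L.filter (fun p => p.2 ≠ t)).foldl (fun m p => pvUFold m p.2 (pvWin tokens w p.1))
          (pvUFold m t ((L.filterMap (fun p => if p.2 = t then some p.1 else none)).flatMap
            (pvWin tokens w))) := by
  induction L generalizing m with
  | nil => simp [pvUFold_nil]
  | cons p L ih =>
      by_cases hp : p.2 = t
      · simp only [List.foldl_cons]
        rw [ih _ (mem_keys_pvUFold_mono _ _ _ _ ht)]
        rw [List.filter_cons_of_neg (by simp [hp]), List.filterMap_cons_some (b := p.1) (by simp [hp]),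
            List.flatMap_cons, pvUFold_append, hp]
      · simp only [List.foldl_cons]
        rw [ih _ (mem_keys_pvUFold_mono _ _ _ _ ht)]
        rw [List.filter_cons_of_pos (by simp [hp]), List.filterMap_cons_none (by simp [hp]),
            List.foldl_cons, pvUFold_comm _ _ _ _ _ hp ht]

-- ---- A's interleaved fold equals the per-group append fold ----
theorem pvGrouped (tokens : List String) (w : Int) : ∀ (L : List (Int × String)),
    (∀ p ∈ L, pvWin tokens w p.1 ≠ []) →
    ∀ m, (∀ p ∈ L, p.2 ∉ pvKeys m) →
    L.foldl (fun m p => pvUFold m p.2 (pvWin tokens w p.1)) m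
      = (pvGrp L).foldl (fun m q => m ++ [(q.1, pvCtr (q.2.flatMap (pvWin tokens w)))]) m := by
  intro L
  induction L using pvGrp.induct with
  | case1 => intro _ m _; simp [pvGrp]
  | case2 i t L ih =>
      have hfix : (List.filter (fun x => match x with | ⟨p, _⟩ => decide (p.2 ≠ t)) L.attach).unattach
          = List.filter (fun p => decide (p.2 ≠ t)) L := by
        rw [List.unattach_filter (g := fun p => decide (p.2 ≠ t)) (hf := fun x h => by simp),
            List.unattach_attach]
      rw [hfix] at ih
      intro hwin m hkeys
      have hwt : pvWin tokens w i ≠ [] := hwin (i, t) (by simp)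
      simp only [List.foldl_cons]
      rw [pvPull tokens w L _ t (mem_keys_pvUFold_self (pvWin tokens w i) m t hwt)]
      rw [← pvUFold_append]
      have hfresh : t ∉ pvKeys m := hkeys (i, t) (by simp)
      rw [pvUFold_fresh _ _ _ hfresh, if_neg (by simp [hwt])]
      rw [pvGrp]
      simp only [List.foldl_cons, List.flatMap_cons]
      rw [ih ?hw (m ++ [(t, pvCtr (pvWin tokens w i ++ (L.filterMap fun p => if p.2 = t then some p.1 else none).flatMap (pvWin tokens w)))]) ?hk]
      case hw =>
        intro p hp
        exact hwin p (List.mem_cons_of_mem _ (List.mem_of_mem_filter hp))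
      case hk =>
        intro p hp
        rw [pvKeys_append, pvKeys_cons]
        simp only [List.mem_append, not_or]
        refine ⟨hkeys p (List.mem_cons_of_mem _ (List.mem_of_mem_filter hp)), ?_⟩
        have := List.of_mem_filter hp
        simp at this ⊢
        exact ⟨this, by simp [pvKeys]⟩

-- ---- the setdefault grouping loop equals pvGrp ----
theorem pvSd_shift (L : List (Int × String)) :
    ∀ (g : List (String × List Int)) (t : String) (ps : List Int),
    L.foldl (fun g p => pvSetdefaultAppend g p.2 p.1) ((t, ps) :: g)
      = (t, ps ++ L.filterMap (fun p => if p.2 = t then some p.1 else none)) ::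
          (L.filter (fun p => p.2 ≠ t)).foldl (fun g p => pvSetdefaultAppend g p.2 p.1) g := by
  induction L with
  | nil => intro g t ps; simp
  | cons p L ih =>
      intro g t ps
      by_cases hp : p.2 = t
      · simp only [List.foldl_cons]
        have he : pvSetdefaultAppend ((t, ps) :: g) p.2 p.1 = (t, ps ++ [p.1]) :: g := by
          simp [pvSetdefaultAppend, hp]
        rw [he, ih g t (ps ++ [p.1]), List.filter_cons_of_neg (by simp [hp]),
            List.filterMap_cons_some (b := p.1) (by simp [hp])]
        simp
      · simp only [List.foldl_cons]
        have he : pvSetdefaultAppend ((t, ps) :: g) p.2 p.1 = (t, ps) :: pvSetdefaultAppend g p.2 p.1 := by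
          simp [pvSetdefaultAppend, Ne.symm hp]
        rw [he, ih _ t ps, List.filter_cons_of_pos (by simp [hp]),
            List.filterMap_cons_none (by simp [hp])]
        simp only [List.foldl_cons]

theorem positions_eq_pvGrp : ∀ (L : List (Int × String)),
    L.foldl (fun g p => pvSetdefaultAppend g p.2 p.1) [] = pvGrp L := by
  intro L
  induction L using pvGrp.induct with
  | case1 => simp [pvGrp]
  | case2 i t L ih =>
      have hfix : (List.filter (fun x => match x with | ⟨p, _⟩ => decide (p.2 ≠ t)) L.attach).unattach
          = List.filter (fun p => decide (p.2 ≠ t)) L := by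
        rw [List.unattach_filter (g := fun p => decide (p.2 ≠ t)) (hf := fun x h => by simp),
            List.unattach_attach]
      rw [hfix] at ih
      simp only [List.foldl_cons]
      show L.foldl (fun g p => pvSetdefaultAppend g p.2 p.1) ((t, [i]) :: []) = _
      rw [pvSd_shift L [] t [i], ih, pvGrp]
      simp

-- ---- facts about pvGrp ----
theorem pvGrp_mem : ∀ (L : List (Int × String)) (q : String × List Int), q ∈ pvGrp L →
    q.2 ≠ [] ∧ ∀ i ∈ q.2, (i, q.1) ∈ L := by
  intro L
  induction L using pvGrp.induct with
  | case1 => intro q hq; simp [pvGrp] at hq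
  | case2 i t L ih =>
      have hfix : (List.filter (fun x => match x with | ⟨p, _⟩ => decide (p.2 ≠ t)) L.attach).unattach
          = List.filter (fun p => decide (p.2 ≠ t)) L := by
        rw [List.unattach_filter (g := fun p => decide (p.2 ≠ t)) (hf := fun x h => by simp),
            List.unattach_attach]
      rw [hfix] at ih
      intro q hq
      rw [pvGrp] at hq
      rcases List.mem_cons.mp hq with h | h
      · subst h
        refine ⟨by simp, ?_⟩
        intro j hj
        rcases List.mem_cons.mp hj with h | h
        · subst h; simp
        · rcases List.mem_filterMap.mp h with ⟨p, hp, he⟩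
          have : p.2 = t ∧ p.1 = j := by
            by_cases hc : p.2 = t
            · simp [hc] at he; exact ⟨hc, he⟩
            · simp [hc] at he
          right
          have : p = (j, t) := Prod.ext this.2 this.1
          exact this ▸ hp
      · obtain ⟨h1, h2⟩ := ih q h
        refine ⟨h1, fun j hj => List.mem_cons_of_mem _ (List.mem_of_mem_filter (h2 j hj))⟩

theorem pvGrp_keys_mem : ∀ (L : List (Int × String)) (s : String), s ∈ pvKeys (pvGrp L) →
    ∃ i, (i, s) ∈ L := by
  intro L
  induction L using pvGrp.induct with
  | case1 => intro s hs; simp [pvGrp, pvKeys] at hs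
  | case2 i t L ih =>
      have hfix : (List.filter (fun x => match x with | ⟨p, _⟩ => decide (p.2 ≠ t)) L.attach).unattach
          = List.filter (fun p => decide (p.2 ≠ t)) L := by
        rw [List.unattach_filter (g := fun p => decide (p.2 ≠ t)) (hf := fun x h => by simp),
            List.unattach_attach]
      rw [hfix] at ih
      intro s hs
      rw [pvGrp, pvKeys_cons] at hs
      rcases List.mem_cons.mp hs with h | h
      · exact ⟨i, by simp [h]⟩
      · obtain ⟨j, hj⟩ := ih s h
        exact ⟨j, List.mem_cons_of_mem _ (List.mem_of_mem_filter hj)⟩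

theorem pvGrp_keys_nodup : ∀ (L : List (Int × String)), (pvKeys (pvGrp L)).Nodup := by
  intro L
  induction L using pvGrp.induct with
  | case1 => simp [pvGrp, pvKeys]
  | case2 i t L ih =>
      have hfix : (List.filter (fun x => match x with | ⟨p, _⟩ => decide (p.2 ≠ t)) L.attach).unattach
          = List.filter (fun p => decide (p.2 ≠ t)) L := by
        rw [List.unattach_filter (g := fun p => decide (p.2 ≠ t)) (hf := fun x h => by simp),
            List.unattach_attach]
      rw [hfix] at ih
      rw [pvGrp, pvKeys_cons]
      refine List.nodup_cons.mpr ⟨?_, ih⟩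
      intro hmem
      obtain ⟨j, hj⟩ := pvGrp_keys_mem _ t hmem
      have := List.of_mem_filter hj
      simp at this

-- ---- B as the same per-group fold ----
theorem pvCounterUpd_append (c : List (String × Int)) (ws ws' : List String) :
    pvCounterUpd c (ws ++ ws') = pvCounterUpd (pvCounterUpd c ws) ws' :=
  List.foldl_append

theorem counts_eq (tokens : List String) (w : Int) (ps : List Int) :
    ∀ c, ps.foldl
        (fun c i =>
          pvCounterUpd
            (pvCounterUpd c (PySem.List.slice tokens (some (max 0 (i - w))) (some i)))
            (PySem.List.slice tokens (some (i + 1))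
              (some (max 0 (min (tokens.length : Int) (i + w + 1)))))) c
      = pvCounterUpd c (ps.flatMap (pvWin tokens w)) := by
  induction ps with
  | nil => intro c; rfl
  | cons i ps ih =>
      intro c
      rw [List.foldl_cons, ih, List.flatMap_cons, pvCounterUpd_append]
      unfold pvWin
      rw [pvCounterUpd_append]

theorem B_eq (tokens : List String) (w : Int) :
    calculate_cooccurrence_alt tokens w
      = (pvGrp (PySem.List.enumerate tokens)).foldl
          (fun m q => pvCFold m q.1 (pvCtr (q.2.flatMap (pvWin tokens w)))) [] := by
  unfold calculate_cooccurrence_alt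
  rw [positions_eq_pvGrp]
  apply PySem.List.foldl_congr_mem
  intro m q hq
  rw [counts_eq tokens w q.2 []]
  rfl

-- ---- per-group: weighted rebuild equals plain append ----
theorem pvGList (tokens : List String) (w : Int) (G : List (String × List Int)) :
    ∀ m, (pvKeys G).Nodup → (∀ q ∈ G, q.1 ∉ pvKeys m) →
    (∀ q ∈ G, q.2.flatMap (pvWin tokens w) ≠ []) →
    G.foldl (fun m q => pvCFold m q.1 (pvCtr (q.2.flatMap (pvWin tokens w)))) m
      = G.foldl (fun m q => m ++ [(q.1, pvCtr (q.2.flatMap (pvWin tokens w)))]) m := by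
  induction G with
  | nil => intro m _ _ _; rfl
  | cons q G ih =>
      intro m hnd hfresh hflat
      rw [pvKeys_cons] at hnd
      simp only [List.nodup_cons] at hnd
      have hne : pvCtr (q.2.flatMap (pvWin tokens w)) ≠ [] := by
        cases hys : q.2.flatMap (pvWin tokens w) with
        | nil => exact absurd hys (hflat q (by simp))
        | cons u ys => exact pvCtr_ne_nil u ys
      rw [List.foldl_cons, List.foldl_cons,
          pvCFold_fresh _ _ _ (hfresh q (by simp)) (nodup_keys_pvCtr _) hne]
      apply ih
      · exact hnd.2
      · intro q' hq'
        rw [pvKeys_append, pvKeys_cons]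
        simp only [List.mem_append, not_or]
        refine ⟨hfresh q' (by simp [hq']), ?_⟩
        simp [pvKeys]
        intro e
        exact hnd.1 (e ▸ (by simp [pvKeys]; exact ⟨q'.2, by simpa using hq'⟩ : q'.1 ∈ pvKeys G))
      · intro q' hq'
        exact hflat q' (by simp [hq'])

-- ---- degenerate windows: both sides are empty ----
theorem A_deg (tokens : List String) (w : Int) (L : List (Int × String))
    (hL : ∀ p ∈ L, pvWin tokens w p.1 = []) :
    ∀ m, L.foldl (fun m p => pvUFold m p.2 (pvWin tokens w p.1)) m = m := by
  induction L with
  | nil => intro m; rfl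
  | cons p L ih =>
      intro m
      rw [List.foldl_cons, hL p (by simp), pvUFold_nil]
      exact ih (fun p hp => hL p (by simp [hp])) m

theorem B_deg_aux (tokens : List String) (w : Int) (G : List (String × List Int))
    (hG : ∀ q ∈ G, q.2.flatMap (pvWin tokens w) = []) :
    ∀ (m : List (String × List (String × Int))),
      G.foldl (fun m q => pvCFold m q.1 (pvCtr (q.2.flatMap (pvWin tokens w)))) m = m := by
  induction G with
  | nil => intro m; rfl
  | cons q G ih =>
      intro m
      simp only [List.foldl_cons]
      rw [hG q (by simp)]
      show List.foldl _ (pvCFold m q.1 []) G = m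
      exact ih (fun q' hq' => hG q' (by simp [hq'])) m

theorem B_deg (tokens : List String) (w : Int) (L : List (Int × String))
    (hL : ∀ p ∈ L, pvWin tokens w p.1 = []) :
    (pvGrp L).foldl (fun m q => pvCFold m q.1 (pvCtr (q.2.flatMap (pvWin tokens w)))) [] = [] := by
  apply B_deg_aux
  intro q hq
  apply List.flatMap_eq_nil_iff.mpr
  intro i hi
  exact hL (i, q.1) ((pvGrp_mem L q hq).2 i hi)

-- ---- the main equality ----
theorem pvMain (tokens : List String) (w : Int) :
    calculate_cooccurrence tokens w = calculate_cooccurrence_alt tokens w := by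
  rw [A_eq_big, B_eq]
  by_cases h : 1 ≤ w ∧ 2 ≤ (tokens.length : Int)
  · have hwin : ∀ p ∈ PySem.List.enumerate tokens, pvWin tokens w p.1 ≠ [] := by
      intro p hp
      rw [PySem.List.mem_enumerate_iff] at hp
      obtain ⟨k, hk, rfl⟩ := hp
      exact pvWin_ne_nil tokens w _ (by omega) (by simp; omega) h.1 h.2
    rw [pvGrouped tokens w _ hwin [] (by intro p _; simp [pvKeys])]
    symm
    apply pvGList tokens w _ []
    · exact pvGrp_keys_nodup _
    · intro q _; simp [pvKeys]
    · intro q hq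
      obtain ⟨h1, h2⟩ := pvGrp_mem _ q hq
      cases hq2 : q.2 with
      | nil => exact absurd hq2 h1
      | cons i ps =>
          rw [List.flatMap_cons]
          have hmem : (i, q.1) ∈ PySem.List.enumerate tokens := h2 i (by simp [hq2])
          rw [PySem.List.mem_enumerate_iff] at hmem
          obtain ⟨k, hk, he⟩ := hmem
          have : pvWin tokens w i ≠ [] := by
            have : i = (k : Int) := by
              have := congrArg Prod.fst he; simpa using this
            rw [this]
            exact pvWin_ne_nil tokens w _ (by omega) (by simp; omega) h.1 h.2
          simp [this]
  · have hdeg : w ≤ 0 ∨ (tokens.length : Int) ≤ 1 := by omega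
    have hwin : ∀ p ∈ PySem.List.enumerate tokens, pvWin tokens w p.1 = [] := by
      intro p hp
      rw [PySem.List.mem_enumerate_iff] at hp
      obtain ⟨k, hk, rfl⟩ := hp
      exact pvWin_nil tokens w _ (by omega) hdeg (by simp; omega)
    rw [A_deg tokens w _ hwin [], B_deg tokens w _ hwin]

-- ===== VERDICT (by name: the statement is the Claim_ definition above) =====
theorem calculate_cooccurrence_spec : Claim_equal_calculate_cooccurrence := by
  intro tokens w _
  unfold Spec_calculate_cooccurrence
  exact pvMain tokens w
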